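-- pv_equiv track=rewrite | github.com/lekesiz/BDC | backend/app/services/ai/note_analysis.py | _parse_ai_skills
-- ===== SOURCE A (Python) =====
-- from typing import Dict, List, Any, Optional, Tuple
--
-- def _parse_ai_skills(skills_text: str) -> Dict[str, List[Dict[str, Any]]]:
--     """Parse skills from AI response"""
--     skills = {
--         'technical_skills': [],
--         'soft_skills': [],
--         'cognitive_skills': [],
--         'subject_knowledge': []
--     }
--
--     current_category = None
--     lines = skills_text.strip().split('\n')
--
--     for line in lines:
--         line = line.strip()
--         if not line:
--             continue
--
--         # Check for category headers
--         if 'technical skill' in line.lower():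
--             current_category = 'technical_skills'
--         elif 'soft skill' in line.lower():
--             current_category = 'soft_skills'
--         elif 'cognitive skill' in line.lower():
--             current_category = 'cognitive_skills'
--         elif 'subject knowledge' in line.lower():
--             current_category = 'subject_knowledge'
--         elif current_category and (line.startswith('-') or line.startswith('•')):
--             # Parse skill entry
--             skill_text = line[1:].strip()
--
--             # Extract skill name and details
--             if ':' in skill_text:
--                 skill_name, details = skill_text.split(':', 1)
--             else:
--                 skill_name = skill_text
--                 details = ''
--
--             # Determine confidence
--             confidence = 'medium'
--             if 'high' in details.lower():
--                 confidence = 'high'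
--             elif 'low' in details.lower():
--                 confidence = 'low'
--
--             skills[current_category].append({
--                 'skill': skill_name.strip(),
--                 'details': details.strip(),
--                 'confidence': confidence
--             })
--
--     return skills
-- ===== SOURCE B (Python) =====
-- # B: segmentation instead of a state machine -- recursively cut the line list
-- # at header lines into (category, body) blocks, then fill each bucket per block.
-- _HEADERS = [('technical skill', 'technical_skills'),
--             ('soft skill', 'soft_skills'),
--             ('cognitive skill', 'cognitive_skills'),
--             ('subject knowledge', 'subject_knowledge')]
--
--
-- def _classify(line):
--     low = line.lower()
--     for pat, key in _HEADERS:
--         if pat in low: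
--             return key
--     return None
--
--
-- def _first_header(lines):
--     return next((i for i, l in enumerate(lines) if _classify(l) is not None),
--                 len(lines))
--
--
-- def _segments(lines):
--     """Recursively split the lines at header lines into (category, body)."""
--     i = _first_header(lines)
--     if i == len(lines):
--         return []
--     cat = _classify(lines[i])
--     rest = lines[i + 1:]
--     j = _first_header(rest)
--     return [(cat, rest[:j])] + _segments(rest[j:])
--
--
-- def _skill_entry(line):
--     text = line[1:].strip()
--     name, _sep, details = text.partition(':')
--     if 'high' in details.lower():
--         confidence = 'high'
--     elif 'low' in details.lower():
--         confidence = 'low'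
--     else:
--         confidence = 'medium'
--     return {'skill': name.strip(), 'details': details.strip(),
--             'confidence': confidence}
--
--
-- def _add_bullets(skills, cat, body):
--     for l in body:
--         if l[:1] in ('-', '•'):
--             skills[cat].append(_skill_entry(l))
--
--
-- def _parse_ai_skills(skills_text):
--     lines = [l.strip() for l in skills_text.strip().split('\n')]
--     skills = {
--         'technical_skills': [],
--         'soft_skills': [],
--         'cognitive_skills': [],
--         'subject_knowledge': []
--     }
--     for cat, body in _segments(lines):
--         _add_bullets(skills, cat, body)
--     return skills
-- ===== Notes on version B (the rewrite author's own statement) =====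
-- stated objective: alternative
-- what changed: A is a single stateful scan that tracks current_category and parses bullets inline; B first recursively cuts the stripped line list at header lines into (category, body) segments (find-first-header + slicing), then fills each bucket segment by segment, splitting name/details with str.partition.
import Mathlib
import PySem

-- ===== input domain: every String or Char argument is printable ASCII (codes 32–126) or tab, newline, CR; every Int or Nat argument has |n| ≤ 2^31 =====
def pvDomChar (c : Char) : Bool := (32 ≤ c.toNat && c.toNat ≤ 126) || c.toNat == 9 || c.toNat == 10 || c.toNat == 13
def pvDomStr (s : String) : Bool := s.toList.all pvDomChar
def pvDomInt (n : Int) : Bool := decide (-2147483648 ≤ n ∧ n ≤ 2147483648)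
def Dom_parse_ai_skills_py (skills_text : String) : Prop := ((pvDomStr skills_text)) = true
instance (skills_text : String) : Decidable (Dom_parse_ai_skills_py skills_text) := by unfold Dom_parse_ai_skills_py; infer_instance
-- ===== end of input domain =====

-- B replaces A's stateful scan by a recursive segmentation of the line list at headers; objective: alternative decomposition, same cost.

-- ===== PORT A =====
-- A's loop body as a named helper (a literal transliteration of the loop body).
def pvStepA (st : Option String × PySem.Dict String (List (List (String × String)))) (line0 : String) :
    Option String × PySem.Dict String (List (List (String × String))) :=
  let line := PySem.Str.strip line0
  if line = "" then st
  else if PySem.Str.isIn "technical skill" (PySem.Str.lower line) then (some "technical_skills", st.2)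
  else if PySem.Str.isIn "soft skill" (PySem.Str.lower line) then (some "soft_skills", st.2)
  else if PySem.Str.isIn "cognitive skill" (PySem.Str.lower line) then (some "cognitive_skills", st.2)
  else if PySem.Str.isIn "subject knowledge" (PySem.Str.lower line) then (some "subject_knowledge", st.2)
  else match st.1 with
    | none => st
    | some cat =>
      if PySem.Str.startswith line "-" || PySem.Str.startswith line "•" then
        let skill_text := PySem.Str.strip (PySem.Str.slice line (some 1) none)
        let nd : String × String :=
          if PySem.Str.isIn ":" skill_text then
            match PySem.Str.splitMax? skill_text ":" 1 with
            | some (a :: b :: _) => (a, b)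
            | _ => (skill_text, "")
          else (skill_text, "")
        let confidence : String :=
          if PySem.Str.isIn "high" (PySem.Str.lower nd.2) then "high"
          else if PySem.Str.isIn "low" (PySem.Str.lower nd.2) then "low" else "medium"
        (some cat, PySem.Dict.modify st.2 cat []
          (· ++ [[("skill", PySem.Str.strip nd.1), ("details", PySem.Str.strip nd.2), ("confidence", confidence)]]))
      else st

def parse_ai_skills_py (skills_text : String) : List (String × List (List (String × String))) :=
  let skills : PySem.Dict String (List (List (String × String))) :=
    PySem.Dict.ofList [("technical_skills", []), ("soft_skills", []), ("cognitive_skills", []), ("subject_knowledge", [])]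
  -- s.split('\n') with nonempty sep: PySem.Str.split? never returns none here
  let lines := (PySem.Str.split? (PySem.Str.strip skills_text) "\n").getD []
  (lines.foldl pvStepA ((none : Option String), skills)).2.items

-- ===== PORT B =====
def pvHeaders : List (String × String) :=
  [("technical skill", "technical_skills"), ("soft skill", "soft_skills"),
   ("cognitive skill", "cognitive_skills"), ("subject knowledge", "subject_knowledge")]

-- the `for pat, key in _HEADERS: …` search in _classify
def pvClassifyGo : List (String × String) → String → Option String
  | [], _ => none
  | (h, k) :: rest, low => if PySem.Str.isIn h low then some k else pvClassifyGo rest low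

def pvClassify (line : String) : Option String := pvClassifyGo pvHeaders (PySem.Str.lower line)

-- next((i for i, l in enumerate(lines) if _classify(l) is not None), len(lines))
def pvFirstHeader : List String → Nat
  | [] => 0
  | l :: ls => if (pvClassify l).isSome then 0 else pvFirstHeader ls + 1

theorem pvFirstHeader_le (ls : List String) : pvFirstHeader ls ≤ ls.length := by
  induction ls with
  | nil => simp [pvFirstHeader]
  | cons l t ih =>
    unfold pvFirstHeader
    by_cases h : (pvClassify l).isSome
    · simp [h]
    · simp [h]; omega

-- _segments: recursively cut the line list at header lines
def pvSegments (lines : List String) : List (String × List String) :=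
  let i := pvFirstHeader lines
  if i = lines.length then []
  else
    let cat := (pvClassify ((PySem.List.pyGet? lines (i : Int)).getD "")).getD ""
    let rest := PySem.List.slice lines (some ((i : Int) + 1)) none
    let j := pvFirstHeader rest
    (cat, PySem.List.slice rest none (some (j : Int))) :: pvSegments (PySem.List.slice rest (some (j : Int)) none)
termination_by lines.length
decreasing_by
  have h1 := pvFirstHeader_le lines
  rw [show ((pvFirstHeader lines : Int) + 1) = ((pvFirstHeader lines + 1 : Nat) : Int) by push_cast; ring,
    PySem.List.slice_from_natCast, PySem.List.slice_from_natCast]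
  simp only [List.length_drop]
  omega

-- l[:1] in ('-', '•')
def pvBulletGuard (l : String) : Bool :=
  let c := PySem.Str.slice l none (some 1)
  c == "-" || c == "•"

-- str.partition(sep) for nonempty sep, via split(sep, 1); exact: partition splits at the first occurrence
def pvPartition (s sep : String) : String × String × String :=
  match PySem.Str.splitMax? s sep 1 with
  | some (a :: b :: _) => (a, sep, b)
  | _ => (s, "", "")

def pvSkillEntry (line : String) : List (String × String) :=
  let text := PySem.Str.strip (PySem.Str.slice line (some 1) none)
  let p := pvPartition text ":"
  let confidence : String :=
    if PySem.Str.isIn "high" (PySem.Str.lower p.2.2) then "high"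
    else if PySem.Str.isIn "low" (PySem.Str.lower p.2.2) then "low" else "medium"
  [("skill", PySem.Str.strip p.1), ("details", PySem.Str.strip p.2.2), ("confidence", confidence)]

def pvAddBullets (skills : PySem.Dict String (List (List (String × String)))) (cat : String)
    (body : List String) : PySem.Dict String (List (List (String × String))) :=
  body.foldl (fun d l => if pvBulletGuard l then PySem.Dict.modify d cat [] (· ++ [pvSkillEntry l]) else d) skills

def parse_ai_skills_py_alt (skills_text : String) : List (String × List (List (String × String))) :=
  let lines := ((PySem.Str.split? (PySem.Str.strip skills_text) "\n").getD []).map PySem.Str.strip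
  let skills : PySem.Dict String (List (List (String × String))) :=
    PySem.Dict.ofList [("technical_skills", []), ("soft_skills", []), ("cognitive_skills", []), ("subject_knowledge", [])]
  ((pvSegments lines).foldl (fun d cb => pvAddBullets d cb.1 cb.2) skills).items

-- ===== PRECONDITION & SPEC =====
def Spec_parse_ai_skills_py (skills_text : String) (out : List (String × List (List (String × String)))) : Prop := out = parse_ai_skills_py_alt skills_text
instance (skills_text : String) (out : List (String × List (List (String × String)))) : Decidable (Spec_parse_ai_skills_py skills_text out) := by unfold Spec_parse_ai_skills_py; infer_instance

-- ===== CLAIM (what is proved, stated in full; the proofs are below) =====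
def Claim_equal_parse_ai_skills_py : Prop := ∀ (skills_text : String), Dom_parse_ai_skills_py skills_text → Spec_parse_ai_skills_py skills_text (parse_ai_skills_py skills_text)

-- ===== LEMMAS AND PROOFS =====

-- the single bullet step of pvAddBullets
def pvBStep (cat : String) (d : PySem.Dict String (List (List (String × String)))) (l : String) :
    PySem.Dict String (List (List (String × String))) :=
  if pvBulletGuard l then PySem.Dict.modify d cat [] (· ++ [pvSkillEntry l]) else d

-- model step: A's loop body on an already-stripped line, phrased with B's pieces
def pvMStep (st : Option String × PySem.Dict String (List (List (String × String)))) (l : String) :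
    Option String × PySem.Dict String (List (List (String × String))) :=
  if l = "" then st
  else match pvClassify l with
    | some k => (some k, st.2)
    | none => match st.1 with
      | none => st
      | some cat => (some cat, pvBStep cat st.2 l)

theorem classify_eq (low : String) :
    pvClassifyGo pvHeaders low =
      (if PySem.Str.isIn "technical skill" low then some "technical_skills"
       else if PySem.Str.isIn "soft skill" low then some "soft_skills"
       else if PySem.Str.isIn "cognitive skill" low then some "cognitive_skills"
       else if PySem.Str.isIn "subject knowledge" low then some "subject_knowledge"
       else none) := rfl

theorem go_no_colon (fuel : Nat) : ∀ (m : Nat) (l cur : List Char) (acc : List (List Char)),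
    ':' ∉ l → PySem.Chars.splitOnMax.go [':'] fuel m l cur acc = ((cur.reverse ++ l) :: acc).reverse := by
  induction fuel with
  | zero => intro m l cur acc _; rfl
  | succ fuel ih =>
    intro m l cur acc hnc
    cases l with
    | nil => simp [PySem.Chars.splitOnMax.go]
    | cons c rest =>
      rw [PySem.Chars.splitOnMax.go]
      by_cases hm : m = 0
      · simp [hm]
      · have hpre : [':'].isPrefixOf (c :: rest) = false := by
          simp [List.isPrefixOf]
          intro hc
          exact hnc (by rw [hc]; exact List.mem_cons_self ..)
        simp only [hm, if_false, hpre]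
        rw [ih m rest (c :: cur) acc (fun hr => hnc (List.mem_cons_of_mem _ hr))]
        simp

theorem splitMax_no_colon (s : String) (h : PySem.Str.isIn ":" s = false) :
    PySem.Str.splitMax? s ":" 1 = some [s] := by
  have hnc : ':' ∉ s.toList := by
    intro hm
    rw [Bool.eq_false_iff] at h
    exact h ((PySem.Str.isIn_iff_infix _ _).mpr ((List.singleton_infix_iff _ _).mpr (by simpa using hm)))
  rw [PySem.Str.splitMax?]
  rw [show (":".toList) = [':'] from rfl]
  rw [PySem.Chars.splitMax?]
  simp only [List.isEmpty_cons, if_false, Bool.false_eq_true]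
  rw [PySem.Chars.splitOnMax]
  simp only [show ¬((1:Int) < 0) by norm_num, if_false]
  rw [go_no_colon _ _ _ _ _ hnc]
  simp [String.ofList]

-- String == compares the character lists
theorem strBeq (s t : String) : (s == t) = (s.toList == t.toList) := by
  by_cases h : s = t
  · simp [h]
  · simp [h, String.toList_inj]

theorem swTake (line p : String) :
    PySem.Str.startswith line p = p.toList.isPrefixOf line.toList := rfl

-- A's bullet test equals B's, on any line
theorem guard_eq (line : String) :
    (PySem.Str.startswith line "-" || PySem.Str.startswith line "•") = pvBulletGuard line := by
  have hsl : (PySem.Str.slice line none (some 1)).toList = line.toList.take 1 := by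
    rw [PySem.Str.toList_slice]
    simp [PySem.List.slice_to _ (by norm_num : (0:Int) ≤ 1)]
  show _ = ((PySem.Str.slice line none (some 1)) == "-" || (PySem.Str.slice line none (some 1)) == "•")
  rw [strBeq, strBeq, hsl, swTake, swTake]
  cases line.toList with
  | nil => rfl
  | cons c rest =>
    show (("-".toList.isPrefixOf (c :: rest)) || ("•".toList.isPrefixOf (c :: rest)))
      = (((c :: rest).take 1 == "-".toList) || ((c :: rest).take 1 == "•".toList))
    by_cases h1 : c = '-'
    · simp [h1, List.isPrefixOf]
    · by_cases h2 : c = '•'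
      · simp [h2, List.isPrefixOf]
      · simp [List.isPrefixOf, beq_eq_false_iff_ne.mpr h1, beq_eq_false_iff_ne.mpr h2,
          beq_eq_false_iff_ne.mpr (Ne.symm h1), beq_eq_false_iff_ne.mpr (Ne.symm h2)]

-- A's inline skill-entry formatting equals pvSkillEntry
theorem entry_eq (line : String) :
    (let skill_text := PySem.Str.strip (PySem.Str.slice line (some 1) none)
     let nd : String × String :=
       if PySem.Str.isIn ":" skill_text then
         match PySem.Str.splitMax? skill_text ":" 1 with
         | some (a :: b :: _) => (a, b)
         | _ => (skill_text, "")
       else (skill_text, "")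
     let confidence : String :=
       if PySem.Str.isIn "high" (PySem.Str.lower nd.2) then "high"
       else if PySem.Str.isIn "low" (PySem.Str.lower nd.2) then "low" else "medium"
     [("skill", PySem.Str.strip nd.1), ("details", PySem.Str.strip nd.2), ("confidence", confidence)])
    = pvSkillEntry line := by
  unfold pvSkillEntry pvPartition
  by_cases hc : PySem.Str.isIn ":" (PySem.Str.strip (PySem.Str.slice line (some 1) none))
  · simp only [hc, if_true]
    cases h : PySem.Str.splitMax? (PySem.Str.strip (PySem.Str.slice line (some 1) none)) ":" 1 with
    | none => simp
    | some l => cases l with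
      | nil => simp
      | cons a t => cases t with
        | nil => simp
        | cons b t2 => simp
  · simp only [hc, if_false, Bool.false_eq_true,
      splitMax_no_colon _ (Bool.eq_false_iff.mpr hc)]

-- A's loop body is the model step on the stripped line
theorem stepA_model (st : Option String × PySem.Dict String (List (List (String × String)))) (line0 : String) :
    pvStepA st line0 = pvMStep st (PySem.Str.strip line0) := by
  obtain ⟨c1, d2⟩ := st
  unfold pvStepA pvMStep pvClassify
  rw [classify_eq]
  by_cases h0 : PySem.Str.strip line0 = ""
  · rw [if_pos h0, if_pos h0]
  · rw [if_neg h0, if_neg h0]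
    by_cases h1 : PySem.Str.isIn "technical skill" (PySem.Str.lower (PySem.Str.strip line0)) = true
    · rw [if_pos h1, if_pos h1]
    · rw [if_neg h1, if_neg h1]
      by_cases h2 : PySem.Str.isIn "soft skill" (PySem.Str.lower (PySem.Str.strip line0)) = true
      · rw [if_pos h2, if_pos h2]
      · rw [if_neg h2, if_neg h2]
        by_cases h3 : PySem.Str.isIn "cognitive skill" (PySem.Str.lower (PySem.Str.strip line0)) = true
        · rw [if_pos h3, if_pos h3]
        · rw [if_neg h3, if_neg h3]
          by_cases h4 : PySem.Str.isIn "subject knowledge" (PySem.Str.lower (PySem.Str.strip line0)) = true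
          · rw [if_pos h4, if_pos h4]
          · rw [if_neg h4, if_neg h4]
            cases c1 with
            | none => rfl
            | some cat =>
              show (if PySem.Str.startswith (PySem.Str.strip line0) "-"
                      || PySem.Str.startswith (PySem.Str.strip line0) "•" then _ else _) = _
              rw [guard_eq]
              show _ = ((some cat : Option String), pvBStep cat d2 (PySem.Str.strip line0))
              unfold pvBStep
              by_cases hb : pvBulletGuard (PySem.Str.strip line0) = true
              · rw [if_pos hb, if_pos hb]
                exact congrArg (fun e => ((some cat : Option String),
                  d2.modify cat [] (· ++ [e]))) (entry_eq (PySem.Str.strip line0))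
              · rw [if_neg hb, if_neg hb]

theorem firstHeader_cons (l : String) (ls : List String) :
    pvFirstHeader (l :: ls) = if (pvClassify l).isSome then 0 else pvFirstHeader ls + 1 := rfl

theorem firstHeader_cons_none (l : String) (ls : List String) (h : pvClassify l = none) :
    pvFirstHeader (l :: ls) = pvFirstHeader ls + 1 := by
  rw [firstHeader_cons]; simp [h]

theorem firstHeader_cons_some (l : String) (ls : List String) (k : String) (h : pvClassify l = some k) :
    pvFirstHeader (l :: ls) = 0 := by
  rw [firstHeader_cons]; simp [h]

theorem segments_nil : pvSegments [] = [] := by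
  unfold pvSegments; rfl

theorem slice_natFrom (ls : List String) (j : Nat) :
    PySem.List.slice ls (some (j : Int)) none = ls.drop j := PySem.List.slice_from_natCast ls j

theorem slice_from_succ (ls : List String) (j : Nat) :
    PySem.List.slice ls (some ((j : Int) + 1)) none = ls.drop (j + 1) := by
  rw [show ((j : Int) + 1) = ((j + 1 : Nat) : Int) by push_cast; ring, PySem.List.slice_from_natCast]

theorem segments_cons_none (l : String) (ls : List String) (h : pvClassify l = none) :
    pvSegments (l :: ls) = pvSegments ls := by
  rw [pvSegments, pvSegments]
  simp only [firstHeader_cons_none l ls h, List.length_cons]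
  by_cases he : pvFirstHeader ls = ls.length
  · simp [he]
  · rw [if_neg (show ¬(pvFirstHeader ls + 1 = ls.length + 1) from fun hh => he (by omega)),
      if_neg he]
    have hrest : PySem.List.slice (l :: ls) (some (((pvFirstHeader ls + 1 : Nat) : Int) + 1)) none
        = PySem.List.slice ls (some (((pvFirstHeader ls : Nat) : Int) + 1)) none := by
      rw [slice_from_succ, slice_from_succ, List.drop_succ_cons]
    have hget : PySem.List.pyGet? (l :: ls) ((pvFirstHeader ls + 1 : Nat) : Int)
        = PySem.List.pyGet? ls ((pvFirstHeader ls : Nat) : Int) := by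
      simp [PySem.List.pyGet?_natCast]
    rw [hrest, hget]

theorem segments_cons_some (l : String) (ls : List String) (cat : String) (h : pvClassify l = some cat) :
    pvSegments (l :: ls) =
      (cat, ls.take (pvFirstHeader ls)) :: pvSegments (ls.drop (pvFirstHeader ls)) := by
  rw [pvSegments]
  simp only [firstHeader_cons_some l ls cat h, List.length_cons]
  rw [if_neg (by omega)]
  have hrest : PySem.List.slice (l :: ls) (some (((0 : Nat) : Int) + 1)) none = ls := by
    rw [slice_from_succ, List.drop_succ_cons, List.drop_zero]
  rw [hrest]
  rw [slice_natFrom, PySem.List.slice_to_natCast]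
  simp [h]

theorem classify_empty : pvClassify "" = none := by decide

theorem bstep_empty (cat : String) (d : PySem.Dict String (List (List (String × String)))) :
    pvBStep cat d "" = d := by
  unfold pvBStep
  rw [if_neg (by decide)]

def pvSegFoldStep (d : PySem.Dict String (List (List (String × String))))
    (cb : String × List String) : PySem.Dict String (List (List (String × String))) :=
  pvAddBullets d cb.1 cb.2

-- main invariant, active-category case
theorem fold_model_some (L : List String) : ∀ (c : String) (d : PySem.Dict String (List (List (String × String)))),
    (L.foldl pvMStep (some c, d)).2
      = (pvSegments (L.drop (pvFirstHeader L))).foldl pvSegFoldStep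
          (pvAddBullets d c (L.take (pvFirstHeader L))) := by
  induction L with
  | nil =>
    intro c d
    simp [pvFirstHeader, segments_nil, pvAddBullets]
  | cons l ls ih =>
    intro c d
    cases hcl : pvClassify l with
    | none =>
      have hstep : pvMStep (some c, d) l = (some c, pvBStep c d l) := by
        unfold pvMStep
        by_cases h0 : l = ""
        · subst h0; rw [if_pos rfl, bstep_empty]
        · rw [if_neg h0, hcl]
      rw [List.foldl_cons, hstep, ih c (pvBStep c d l),
        firstHeader_cons_none l ls hcl]
      simp only [List.drop_succ_cons, List.take_succ_cons]
      rfl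
    | some cat =>
      have hne : l ≠ "" := by
        intro h0
        rw [h0, classify_empty] at hcl
        cases hcl
      have hstep : pvMStep (some c, d) l = (some cat, d) := by
        unfold pvMStep
        rw [if_neg hne, hcl]
      rw [List.foldl_cons, hstep, ih cat d,
        firstHeader_cons_some l ls cat hcl]
      simp only [List.drop_zero, List.take_zero]
      rw [segments_cons_some l ls cat hcl]
      simp only [List.foldl_cons]
      rfl

-- main invariant from the initial None state
theorem fold_model_none (L : List String) : ∀ (d : PySem.Dict String (List (List (String × String)))),
    (L.foldl pvMStep (none, d)).2 = (pvSegments L).foldl pvSegFoldStep d := by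
  induction L with
  | nil => intro d; simp [segments_nil]
  | cons l ls ih =>
    intro d
    cases hcl : pvClassify l with
    | none =>
      have hstep : pvMStep (none, d) l = (none, d) := by
        unfold pvMStep
        by_cases h0 : l = ""
        · rw [if_pos h0]
        · rw [if_neg h0, hcl]
      rw [List.foldl_cons, hstep, ih d, segments_cons_none l ls hcl]
    | some cat =>
      have hne : l ≠ "" := by
        intro h0
        rw [h0, classify_empty] at hcl
        cases hcl
      have hstep : pvMStep (none, d) l = (some cat, d) := by
        unfold pvMStep
        rw [if_neg hne, hcl]
      rw [List.foldl_cons, hstep, segments_cons_some l ls cat hcl]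
      simp only [List.foldl_cons]
      rw [fold_model_some ls cat d]
      rfl

-- ===== VERDICT (by name: the statement is the Claim_ definition above) =====
theorem parse_ai_skills_py_spec : Claim_equal_parse_ai_skills_py := by
  intro s _
  show (((PySem.Str.split? (PySem.Str.strip s) "\n").getD []).foldl pvStepA
      ((none : Option String), PySem.Dict.ofList
        [("technical_skills", []), ("soft_skills", []), ("cognitive_skills", []), ("subject_knowledge", [])])).2.items
    = ((pvSegments (((PySem.Str.split? (PySem.Str.strip s) "\n").getD []).map PySem.Str.strip)).foldl
        (fun d cb => pvAddBullets d cb.1 cb.2)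
        (PySem.Dict.ofList
          [("technical_skills", []), ("soft_skills", []), ("cognitive_skills", []), ("subject_knowledge", [])])).items
  rw [show pvStepA = fun st l => pvMStep st (PySem.Str.strip l) from funext₂ stepA_model,
    ← List.foldl_map]
  rw [fold_model_none]
  rfl
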